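-- pv_equiv track=rewrite | github.com/sfdg4869/automatic_installer | installer/router.py | route_prompt
-- ===== SOURCE A (Python) =====
-- def route_prompt(text: str, extra_vars: dict = None) -> str:
--     """
--     Rout the installation to the correct agent/executor based on keywords
--     in the prompt text or parsed variables.
--     """
--     if not text:
--         text = ""
--
--     text_lower = text.lower()
--
--     # 1. Check Extra Vars if parsed
--     if extra_vars:
--         keys_lower = [k.lower() for k in extra_vars.keys()]
--         if any("pjs" in k or "node" in k or "js" in k for k in keys_lower):
--             return "pjs"
--         if any("rts" in k or "ipc" in k for k in keys_lower):
--             return "daemon"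
--
--     # 2. Check Text Clues
--     # PJS should take absolute precedence if explicitly mentioned in the file name or prompt
--     if "pjs" in text_lower or "platform.tar" in text_lower or "platformjs" in text_lower:
--         return "pjs"
--
--     if "dgm" in text_lower or "dg_m" in text_lower or "master.tar" in text_lower or "dg_" in text_lower or "datagather" in text_lower:
--         return "dgm"
--
--     if "dgs" in text_lower or "dg_s" in text_lower or "slave.tar" in text_lower:
--         return "dgs"
--
--     if "rts" in text_lower or "daemon" in text_lower or "ipc_key" in text_lower or "pmon_name" in text_lower:
--         return "daemon"
--
--     # Default
--     return "daemon"
-- ===== SOURCE B (Python) =====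
-- # Priority-scan re-implementation: instead of an ordered chain of substring
-- # tests, scan every position of the string once, matching keywords by
-- # startswith and keeping the minimum priority seen; the final label is a
-- # table lookup on that priority.
--
-- TEXT_KW = {
--     "pjs": 0, "platform.tar": 0, "platformjs": 0,
--     "dgm": 1, "dg_m": 1, "master.tar": 1, "dg_": 1, "datagather": 1,
--     "dgs": 2, "dg_s": 2, "slave.tar": 2,
--     "rts": 3, "daemon": 3, "ipc_key": 3, "pmon_name": 3,
-- }
-- TEXT_LABELS = ["pjs", "dgm", "dgs", "daemon", "daemon"]
--
-- EXTRA_KW = {"pjs": 0, "node": 0, "js": 0, "rts": 1, "ipc": 1}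
-- EXTRA_LABELS = ["pjs", "daemon"]
--
--
-- def _best_match(s, kw_map, best):
--     i = 0
--     while i < len(s):
--         for kw, p in kw_map.items():
--             if s.startswith(kw, i) and p < best:
--                 best = p
--         i += 1
--     return best
--
--
-- def route_prompt(text: str, extra_vars: dict = None) -> str:
--     if extra_vars:
--         best = 2
--         for k in extra_vars:
--             best = _best_match(k.lower(), EXTRA_KW, best)
--         if best < 2:
--             return EXTRA_LABELS[best]
--     text_lower = (text or "").lower()
--     return TEXT_LABELS[_best_match(text_lower, TEXT_KW, 4)]
-- ===== Notes on version B (the rewrite author's own statement) =====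
-- stated objective: alternative
-- what changed: Replaced the ordered chain of substring membership tests with a single positional scan: every position of the lowercased string is checked once against a keyword-to-priority map, the minimum priority seen is accumulated, and the result label is a table lookup on that priority.
import Mathlib
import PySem

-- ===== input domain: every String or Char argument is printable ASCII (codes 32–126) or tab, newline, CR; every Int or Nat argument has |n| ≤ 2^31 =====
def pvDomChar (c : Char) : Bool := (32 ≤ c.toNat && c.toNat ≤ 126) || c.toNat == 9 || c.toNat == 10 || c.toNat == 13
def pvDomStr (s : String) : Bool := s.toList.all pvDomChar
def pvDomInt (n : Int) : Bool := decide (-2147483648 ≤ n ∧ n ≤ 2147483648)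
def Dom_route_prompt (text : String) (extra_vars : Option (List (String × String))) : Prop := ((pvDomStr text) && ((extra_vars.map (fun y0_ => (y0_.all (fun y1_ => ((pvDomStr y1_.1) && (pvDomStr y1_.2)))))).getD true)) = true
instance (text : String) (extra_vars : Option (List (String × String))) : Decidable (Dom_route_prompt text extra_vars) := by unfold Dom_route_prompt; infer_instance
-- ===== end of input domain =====

-- B routes by a positional priority scan (minimum matched keyword priority, then a label table)
-- instead of A's ordered chain of substring tests: an alternative algorithm, not claimed faster.


-- ===== PORT A =====
def route_prompt (text : String) (extra_vars : Option (List (String × String))) : String :=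
  -- `if not text: text = ""` (only the empty string is falsy on type str)
  let text := if text == "" then "" else text
  let text_lower := PySem.Str.lower text
  -- 1. Check Extra Vars if parsed (`if extra_vars:` — truthy iff some non-empty dict)
  let fromExtra : Option String :=
    match extra_vars with
    | none => none
    | some d =>
      if d.isEmpty then none
      else
        let keys_lower := d.map (fun kv => PySem.Str.lower kv.1)
        if keys_lower.any (fun k => PySem.Str.isIn "pjs" k || PySem.Str.isIn "node" k || PySem.Str.isIn "js" k) then
          some "pjs"
        else if keys_lower.any (fun k => PySem.Str.isIn "rts" k || PySem.Str.isIn "ipc" k) then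
          some "daemon"
        else none
  match fromExtra with
  | some r => r
  | none =>
    -- 2. Check Text Clues
    if PySem.Str.isIn "pjs" text_lower || PySem.Str.isIn "platform.tar" text_lower || PySem.Str.isIn "platformjs" text_lower then
      "pjs"
    else if PySem.Str.isIn "dgm" text_lower || PySem.Str.isIn "dg_m" text_lower || PySem.Str.isIn "master.tar" text_lower || PySem.Str.isIn "dg_" text_lower || PySem.Str.isIn "datagather" text_lower then
      "dgm"
    else if PySem.Str.isIn "dgs" text_lower || PySem.Str.isIn "dg_s" text_lower || PySem.Str.isIn "slave.tar" text_lower then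
      "dgs"
    else if PySem.Str.isIn "rts" text_lower || PySem.Str.isIn "daemon" text_lower || PySem.Str.isIn "ipc_key" text_lower || PySem.Str.isIn "pmon_name" text_lower then
      "daemon"
    else
      "daemon"

-- ===== PORT B =====
-- keyword → priority maps and priority → label tables (Source B's TEXT_KW / TEXT_LABELS / EXTRA_KW / EXTRA_LABELS)
def pvTextKw : List (List Char × Nat) :=
  [("pjs".toList, 0), ("platform.tar".toList, 0), ("platformjs".toList, 0),
   ("dgm".toList, 1), ("dg_m".toList, 1), ("master.tar".toList, 1), ("dg_".toList, 1), ("datagather".toList, 1),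
   ("dgs".toList, 2), ("dg_s".toList, 2), ("slave.tar".toList, 2),
   ("rts".toList, 3), ("daemon".toList, 3), ("ipc_key".toList, 3), ("pmon_name".toList, 3)]

def pvTextLabels : List String := ["pjs", "dgm", "dgs", "daemon", "daemon"]

def pvExtraKw : List (List Char × Nat) :=
  [("pjs".toList, 0), ("node".toList, 0), ("js".toList, 0), ("rts".toList, 1), ("ipc".toList, 1)]

def pvExtraLabels : List String := ["pjs", "daemon"]

-- one position of _best_match's inner `for kw, p in kw_map.items()` loop
def pvPosMin (kws : List (List Char × Nat)) (best : Nat) (suf : List Char) : Nat :=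
  kws.foldl (fun b kp => if kp.1.isPrefixOf suf && kp.2 < b then kp.2 else b) best

-- _best_match's `while i < len(s)` loop: the suffix s[i:] is the list being recursed on
def pvScanGo (kws : List (List Char × Nat)) : List Char → Nat → Nat
  | [], best => best
  | c :: rest, best => pvScanGo kws rest (pvPosMin kws best (c :: rest))

def route_prompt_alt (text : String) (extra_vars : Option (List (String × String))) : String :=
  let textStage : Unit → String := fun _ =>
    let text_lower := PySem.Str.lower (if text == "" then "" else text)
    -- list index TEXT_LABELS[best]: best ≤ 4 always (scan only lowers the initial 4), so in range
    pvTextLabels.getD (pvScanGo pvTextKw text_lower.toList 4) ""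
  match extra_vars with
  | none => textStage ()
  | some d =>
    if d.isEmpty then textStage ()
    else
      let best := d.foldl (fun b kv => pvScanGo pvExtraKw (PySem.Str.lower kv.1).toList b) 2
      if best < 2 then pvExtraLabels.getD best "" else textStage ()

-- ===== PRECONDITION & SPEC =====
def Spec_route_prompt (text : String) (extra_vars : Option (List (String × String))) (out : String) : Prop := out = route_prompt_alt text extra_vars
instance (text : String) (extra_vars : Option (List (String × String))) (out : String) : Decidable (Spec_route_prompt text extra_vars out) := by unfold Spec_route_prompt; infer_instance

-- ===== CLAIM (what is proved, stated in full; the proofs are below) =====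
def Claim_equal_route_prompt : Prop := ∀ (text : String) (extra_vars : Option (List (String × String))), Dom_route_prompt text extra_vars → Spec_route_prompt text extra_vars (route_prompt text extra_vars)

-- ===== LEMMAS AND PROOFS =====

theorem pvPosMin_le_iff (kws : List (List Char × Nat)) (b p : Nat) (suf : List Char) :
    pvPosMin kws b suf ≤ p ↔ b ≤ p ∨ ∃ kp ∈ kws, kp.2 ≤ p ∧ kp.1 <+: suf := by
  induction kws generalizing b with
  | nil => simp [pvPosMin]
  | cons kp rest ih =>
    simp only [pvPosMin, List.foldl_cons] at *
    rw [ih]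
    by_cases hpre : kp.1.isPrefixOf suf
    · have hpre' : kp.1 <+: suf := List.isPrefixOf_iff_prefix.mp hpre
      by_cases hlt : kp.2 < b
      · simp only [hpre, hlt, decide_true, Bool.and_self, if_true, List.mem_cons]
        constructor
        · rintro (h | h)
          · exact Or.inr ⟨kp, Or.inl rfl, h, hpre'⟩
          · obtain ⟨q, hq, h⟩ := h; exact Or.inr ⟨q, Or.inr hq, h⟩
        · rintro (h | ⟨q, (rfl | hq), hle, hp⟩)
          · exact Or.inl (le_trans (le_of_lt hlt) h)
          · exact Or.inl hle
          · exact Or.inr ⟨q, hq, hle, hp⟩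
      · simp only [hpre, hlt, decide_false, Bool.and_false, List.mem_cons]
        constructor
        · rintro (h | ⟨q, hq, h⟩)
          · exact Or.inl h
          · exact Or.inr ⟨q, Or.inr hq, h⟩
        · rintro (h | ⟨q, (rfl | hq), hle, hp⟩)
          · exact Or.inl h
          · exact Or.inl (le_trans (le_of_not_gt hlt) hle)
          · exact Or.inr ⟨q, hq, hle, hp⟩
    · have hpre' : ¬ kp.1 <+: suf := fun h => hpre (List.isPrefixOf_iff_prefix.mpr h)
      simp only [hpre, Bool.false_and, List.mem_cons]
      constructor
      · rintro (h | ⟨q, hq, h⟩)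
        · exact Or.inl h
        · exact Or.inr ⟨q, Or.inr hq, h⟩
      · rintro (h | ⟨q, (rfl | hq), hle, hp⟩)
        · exact Or.inl h
        · exact absurd hp hpre'
        · exact Or.inr ⟨q, hq, hle, hp⟩

theorem pvScanGo_le_iff (kws : List (List Char × Nat)) (hne : ∀ kp ∈ kws, kp.1 ≠ [])
    (tl : List Char) (b p : Nat) :
    pvScanGo kws tl b ≤ p ↔ b ≤ p ∨ ∃ kp ∈ kws, kp.2 ≤ p ∧ kp.1 <:+: tl := by
  induction tl generalizing b with
  | nil =>
    simp only [pvScanGo]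
    constructor
    · exact Or.inl
    · rintro (h | ⟨q, hq, _, hp⟩)
      · exact h
      · exact absurd (List.eq_nil_of_infix_nil hp) (hne q hq)
  | cons c rest ih =>
    simp only [pvScanGo]
    rw [ih, pvPosMin_le_iff]
    constructor
    · rintro ((h | ⟨q, hq, hle, hp⟩) | ⟨q, hq, hle, hp⟩)
      · exact Or.inl h
      · exact Or.inr ⟨q, hq, hle, hp.isInfix⟩
      · exact Or.inr ⟨q, hq, hle, List.infix_cons_iff.mpr (Or.inr hp)⟩
    · rintro (h | ⟨q, hq, hle, hp⟩)
      · exact Or.inl (Or.inl h)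
      · rcases List.infix_cons_iff.mp hp with h1 | h1
        · exact Or.inl (Or.inr ⟨q, hq, hle, h1⟩)
        · exact Or.inr ⟨q, hq, hle, h1⟩

theorem pvExtraFold_le_iff (keys : List (String × String)) (b p : Nat) :
    keys.foldl (fun b kv => pvScanGo pvExtraKw (PySem.Str.lower kv.1).toList b) b ≤ p ↔
      b ≤ p ∨ ∃ kv ∈ keys, ∃ kp ∈ pvExtraKw, kp.2 ≤ p ∧ kp.1 <:+: (PySem.Str.lower kv.1).toList := by
  induction keys generalizing b with
  | nil => simp
  | cons kv rest ih =>
    simp only [List.foldl_cons, List.mem_cons]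
    rw [ih, pvScanGo_le_iff pvExtraKw (by decide)]
    constructor
    · rintro ((h | h) | ⟨q, hq, h⟩)
      · exact Or.inl h
      · exact Or.inr ⟨kv, Or.inl rfl, h⟩
      · exact Or.inr ⟨q, Or.inr hq, h⟩
    · rintro (h | ⟨q, (rfl | hq), h⟩)
      · exact Or.inl (Or.inl h)
      · exact Or.inl (Or.inr h)
      · exact Or.inr ⟨q, hq, h⟩

theorem pvTextStage_eq (s : String) :
    pvTextLabels.getD (pvScanGo pvTextKw s.toList 4) "" =
    (if PySem.Str.isIn "pjs" s || PySem.Str.isIn "platform.tar" s || PySem.Str.isIn "platformjs" s then "pjs"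
     else if PySem.Str.isIn "dgm" s || PySem.Str.isIn "dg_m" s || PySem.Str.isIn "master.tar" s || PySem.Str.isIn "dg_" s || PySem.Str.isIn "datagather" s then "dgm"
     else if PySem.Str.isIn "dgs" s || PySem.Str.isIn "dg_s" s || PySem.Str.isIn "slave.tar" s then "dgs"
     else if PySem.Str.isIn "rts" s || PySem.Str.isIn "daemon" s || PySem.Str.isIn "ipc_key" s || PySem.Str.isIn "pmon_name" s then "daemon"
     else "daemon") := by
  have hle := fun p => pvScanGo_le_iff pvTextKw (by decide) s.toList 4 p
  have h0 : pvScanGo pvTextKw s.toList 4 ≤ 0 ↔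
      ("pjs".toList <:+: s.toList ∨ "platform.tar".toList <:+: s.toList ∨ "platformjs".toList <:+: s.toList) := by
    rw [hle 0]
    simp [pvTextKw]
  have h1 : pvScanGo pvTextKw s.toList 4 ≤ 1 ↔
      ("pjs".toList <:+: s.toList ∨ "platform.tar".toList <:+: s.toList ∨ "platformjs".toList <:+: s.toList ∨ "dgm".toList <:+: s.toList ∨ "dg_m".toList <:+: s.toList ∨ "master.tar".toList <:+: s.toList ∨ "dg_".toList <:+: s.toList ∨ "datagather".toList <:+: s.toList) := by
    rw [hle 1]
    simp [pvTextKw]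
  have h2 : pvScanGo pvTextKw s.toList 4 ≤ 2 ↔
      ("pjs".toList <:+: s.toList ∨ "platform.tar".toList <:+: s.toList ∨ "platformjs".toList <:+: s.toList ∨ "dgm".toList <:+: s.toList ∨ "dg_m".toList <:+: s.toList ∨ "master.tar".toList <:+: s.toList ∨ "dg_".toList <:+: s.toList ∨ "datagather".toList <:+: s.toList ∨ "dgs".toList <:+: s.toList ∨ "dg_s".toList <:+: s.toList ∨ "slave.tar".toList <:+: s.toList) := by
    rw [hle 2]
    simp [pvTextKw]
  have h3 : pvScanGo pvTextKw s.toList 4 ≤ 3 ↔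
      ("pjs".toList <:+: s.toList ∨ "platform.tar".toList <:+: s.toList ∨ "platformjs".toList <:+: s.toList ∨ "dgm".toList <:+: s.toList ∨ "dg_m".toList <:+: s.toList ∨ "master.tar".toList <:+: s.toList ∨ "dg_".toList <:+: s.toList ∨ "datagather".toList <:+: s.toList ∨ "dgs".toList <:+: s.toList ∨ "dg_s".toList <:+: s.toList ∨ "slave.tar".toList <:+: s.toList ∨ "rts".toList <:+: s.toList ∨ "daemon".toList <:+: s.toList ∨ "ipc_key".toList <:+: s.toList ∨ "pmon_name".toList <:+: s.toList) := by
    rw [hle 3]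
    simp [pvTextKw]
  have h4 : pvScanGo pvTextKw s.toList 4 ≤ 4 := (hle 4).mpr (Or.inl le_rfl)
  simp only [Bool.or_eq_true, PySem.Str.isIn_iff_infix]
  split_ifs with c0 c1 c2 c3
  · have hv : pvScanGo pvTextKw s.toList 4 = 0 := by
      have ha : pvScanGo pvTextKw s.toList 4 ≤ 0 := by
        rcases c0 with ((x|x)|x)
        exacts [h0.mpr (Or.inl x), h0.mpr (Or.inr (Or.inl x)), h0.mpr (Or.inr (Or.inr (x)))]
      omega
    rw [hv]; rfl
  · have hv : pvScanGo pvTextKw s.toList 4 = 1 := by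
      have ha : pvScanGo pvTextKw s.toList 4 ≤ 1 := by
        rcases c1 with ((((x|x)|x)|x)|x)
        exacts [h1.mpr (Or.inr (Or.inr (Or.inr (Or.inl x)))), h1.mpr (Or.inr (Or.inr (Or.inr (Or.inr (Or.inl x))))), h1.mpr (Or.inr (Or.inr (Or.inr (Or.inr (Or.inr (Or.inl x)))))), h1.mpr (Or.inr (Or.inr (Or.inr (Or.inr (Or.inr (Or.inr (Or.inl x))))))), h1.mpr (Or.inr (Or.inr (Or.inr (Or.inr (Or.inr (Or.inr (Or.inr (x))))))))]
      have hb : ¬ pvScanGo pvTextKw s.toList 4 ≤ 0 := fun h => by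
        rcases h0.mp h with x|x|x
        exacts [c0 (Or.inl (Or.inl (x))), c0 (Or.inl (Or.inr x)), c0 (Or.inr x)]
      omega
    rw [hv]; rfl
  · have hv : pvScanGo pvTextKw s.toList 4 = 2 := by
      have ha : pvScanGo pvTextKw s.toList 4 ≤ 2 := by
        rcases c2 with ((x|x)|x)
        exacts [h2.mpr (Or.inr (Or.inr (Or.inr (Or.inr (Or.inr (Or.inr (Or.inr (Or.inr (Or.inl x))))))))), h2.mpr (Or.inr (Or.inr (Or.inr (Or.inr (Or.inr (Or.inr (Or.inr (Or.inr (Or.inr (Or.inl x)))))))))), h2.mpr (Or.inr (Or.inr (Or.inr (Or.inr (Or.inr (Or.inr (Or.inr (Or.inr (Or.inr (Or.inr (x)))))))))))]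
      have hb : ¬ pvScanGo pvTextKw s.toList 4 ≤ 1 := fun h => by
        rcases h1.mp h with x|x|x|x|x|x|x|x
        exacts [c0 (Or.inl (Or.inl (x))), c0 (Or.inl (Or.inr x)), c0 (Or.inr x), c1 (Or.inl (Or.inl (Or.inl (Or.inl (x))))), c1 (Or.inl (Or.inl (Or.inl (Or.inr x)))), c1 (Or.inl (Or.inl (Or.inr x))), c1 (Or.inl (Or.inr x)), c1 (Or.inr x)]
      omega
    rw [hv]; rfl
  · have hv : pvScanGo pvTextKw s.toList 4 = 3 := by
      have ha : pvScanGo pvTextKw s.toList 4 ≤ 3 := by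
        rcases c3 with (((x|x)|x)|x)
        exacts [h3.mpr (Or.inr (Or.inr (Or.inr (Or.inr (Or.inr (Or.inr (Or.inr (Or.inr (Or.inr (Or.inr (Or.inr (Or.inl x)))))))))))), h3.mpr (Or.inr (Or.inr (Or.inr (Or.inr (Or.inr (Or.inr (Or.inr (Or.inr (Or.inr (Or.inr (Or.inr (Or.inr (Or.inl x))))))))))))), h3.mpr (Or.inr (Or.inr (Or.inr (Or.inr (Or.inr (Or.inr (Or.inr (Or.inr (Or.inr (Or.inr (Or.inr (Or.inr (Or.inr (Or.inl x)))))))))))))), h3.mpr (Or.inr (Or.inr (Or.inr (Or.inr (Or.inr (Or.inr (Or.inr (Or.inr (Or.inr (Or.inr (Or.inr (Or.inr (Or.inr (Or.inr (x)))))))))))))))]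
      have hb : ¬ pvScanGo pvTextKw s.toList 4 ≤ 2 := fun h => by
        rcases h2.mp h with x|x|x|x|x|x|x|x|x|x|x
        exacts [c0 (Or.inl (Or.inl (x))), c0 (Or.inl (Or.inr x)), c0 (Or.inr x), c1 (Or.inl (Or.inl (Or.inl (Or.inl (x))))), c1 (Or.inl (Or.inl (Or.inl (Or.inr x)))), c1 (Or.inl (Or.inl (Or.inr x))), c1 (Or.inl (Or.inr x)), c1 (Or.inr x), c2 (Or.inl (Or.inl (x))), c2 (Or.inl (Or.inr x)), c2 (Or.inr x)]
      omega
    rw [hv]; rfl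
  · have hv : pvScanGo pvTextKw s.toList 4 = 4 := by
      have hb : ¬ pvScanGo pvTextKw s.toList 4 ≤ 3 := fun h => by
        rcases h3.mp h with x|x|x|x|x|x|x|x|x|x|x|x|x|x|x
        exacts [c0 (Or.inl (Or.inl (x))), c0 (Or.inl (Or.inr x)), c0 (Or.inr x), c1 (Or.inl (Or.inl (Or.inl (Or.inl (x))))), c1 (Or.inl (Or.inl (Or.inl (Or.inr x)))), c1 (Or.inl (Or.inl (Or.inr x))), c1 (Or.inl (Or.inr x)), c1 (Or.inr x), c2 (Or.inl (Or.inl (x))), c2 (Or.inl (Or.inr x)), c2 (Or.inr x), c3 (Or.inl (Or.inl (Or.inl (x)))), c3 (Or.inl (Or.inl (Or.inr x))), c3 (Or.inl (Or.inr x)), c3 (Or.inr x)]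
      omega
    rw [hv]; rfl

theorem route_prompt_eq_alt (text : String) (extra_vars : Option (List (String × String))) :
    route_prompt text extra_vars = route_prompt_alt text extra_vars := by
  unfold route_prompt route_prompt_alt
  cases extra_vars with
  | none =>
    exact (pvTextStage_eq (PySem.Str.lower (if text == "" then "" else text))).symm
  | some d =>
    dsimp only
    by_cases hd : d.isEmpty = true
    · rw [if_pos hd, if_pos hd]
      exact (pvTextStage_eq (PySem.Str.lower (if text == "" then "" else text))).symm
    · rw [if_neg hd, if_neg hd]
      have e2 : d.foldl (fun b kv => pvScanGo pvExtraKw (PySem.Str.lower kv.1).toList b) 2 ≤ 2 :=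
        (pvExtraFold_le_iff d 2 2).mpr (Or.inl le_rfl)
      by_cases cA : (d.map (fun kv => PySem.Str.lower kv.1)).any
          (fun k => PySem.Str.isIn "pjs" k || PySem.Str.isIn "node" k || PySem.Str.isIn "js" k) = true
      · have e0 : d.foldl (fun b kv => pvScanGo pvExtraKw (PySem.Str.lower kv.1).toList b) 2 ≤ 0 := by
          simp only [List.any_map, List.any_eq_true, Function.comp, Bool.or_eq_true,
            PySem.Str.isIn_iff_infix] at cA
          obtain ⟨kv, hkv, h⟩ := cA
          refine (pvExtraFold_le_iff d 2 0).mpr (Or.inr ⟨kv, hkv, ?_⟩)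
          rcases h with (h | h) | h
          · exact ⟨("pjs".toList, 0), by simp [pvExtraKw], le_rfl, h⟩
          · exact ⟨("node".toList, 0), by simp [pvExtraKw], le_rfl, h⟩
          · exact ⟨("js".toList, 0), by simp [pvExtraKw], le_rfl, h⟩
        have hv : d.foldl (fun b kv => pvScanGo pvExtraKw (PySem.Str.lower kv.1).toList b) 2 = 0 := by omega
        rw [if_pos cA, hv]
        rfl
      · by_cases cB : (d.map (fun kv => PySem.Str.lower kv.1)).any
            (fun k => PySem.Str.isIn "rts" k || PySem.Str.isIn "ipc" k) = true
        · have e1 : d.foldl (fun b kv => pvScanGo pvExtraKw (PySem.Str.lower kv.1).toList b) 2 ≤ 1 := by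
            simp only [List.any_map, List.any_eq_true, Function.comp, Bool.or_eq_true,
              PySem.Str.isIn_iff_infix] at cB
            obtain ⟨kv, hkv, h⟩ := cB
            refine (pvExtraFold_le_iff d 2 1).mpr (Or.inr ⟨kv, hkv, ?_⟩)
            rcases h with h | h
            · exact ⟨("rts".toList, 1), by simp [pvExtraKw], le_rfl, h⟩
            · exact ⟨("ipc".toList, 1), by simp [pvExtraKw], le_rfl, h⟩
          have ne0 : ¬ d.foldl (fun b kv => pvScanGo pvExtraKw (PySem.Str.lower kv.1).toList b) 2 ≤ 0 := by
            intro h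
            rcases (pvExtraFold_le_iff d 2 0).mp h with h | ⟨kv, hkv, kp, hkp, hle, hinf⟩
            · omega
            · apply cA
              simp only [List.any_map, List.any_eq_true, Function.comp, Bool.or_eq_true,
                PySem.Str.isIn_iff_infix]
              simp only [pvExtraKw, List.mem_cons, List.not_mem_nil, or_false] at hkp
              rcases hkp with rfl | rfl | rfl | rfl | rfl
              · exact ⟨kv, hkv, Or.inl (Or.inl hinf)⟩
              · exact ⟨kv, hkv, Or.inl (Or.inr hinf)⟩
              · exact ⟨kv, hkv, Or.inr hinf⟩
              · exact absurd hle (by decide)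
              · exact absurd hle (by decide)
          have hv : d.foldl (fun b kv => pvScanGo pvExtraKw (PySem.Str.lower kv.1).toList b) 2 = 1 := by omega
          rw [if_neg cA, if_pos cB, hv]
          rfl
        · have ne1 : ¬ d.foldl (fun b kv => pvScanGo pvExtraKw (PySem.Str.lower kv.1).toList b) 2 ≤ 1 := by
            intro h
            rcases (pvExtraFold_le_iff d 2 1).mp h with h | ⟨kv, hkv, kp, hkp, hle, hinf⟩
            · omega
            · simp only [pvExtraKw, List.mem_cons, List.not_mem_nil, or_false] at hkp
              rcases hkp with rfl | rfl | rfl | rfl | rfl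
              · exact cA (by
                  simp only [List.any_map, List.any_eq_true, Function.comp, Bool.or_eq_true,
                    PySem.Str.isIn_iff_infix]
                  exact ⟨kv, hkv, Or.inl (Or.inl hinf)⟩)
              · exact cA (by
                  simp only [List.any_map, List.any_eq_true, Function.comp, Bool.or_eq_true,
                    PySem.Str.isIn_iff_infix]
                  exact ⟨kv, hkv, Or.inl (Or.inr hinf)⟩)
              · exact cA (by
                  simp only [List.any_map, List.any_eq_true, Function.comp, Bool.or_eq_true,
                    PySem.Str.isIn_iff_infix]
                  exact ⟨kv, hkv, Or.inr hinf⟩)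
              · exact cB (by
                  simp only [List.any_map, List.any_eq_true, Function.comp, Bool.or_eq_true,
                    PySem.Str.isIn_iff_infix]
                  exact ⟨kv, hkv, Or.inl hinf⟩)
              · exact cB (by
                  simp only [List.any_map, List.any_eq_true, Function.comp, Bool.or_eq_true,
                    PySem.Str.isIn_iff_infix]
                  exact ⟨kv, hkv, Or.inr hinf⟩)
          have hv : d.foldl (fun b kv => pvScanGo pvExtraKw (PySem.Str.lower kv.1).toList b) 2 = 2 := by omega
          rw [if_neg cA, if_neg cB, hv]
          have : ¬ (2 : Nat) < 2 := by omega
          rw [if_neg this]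
          exact (pvTextStage_eq (PySem.Str.lower (if text == "" then "" else text))).symm

-- ===== VERDICT (by name: the statement is the Claim_ definition above) =====
theorem route_prompt_spec : Claim_equal_route_prompt := by
  intro text extra_vars _
  exact route_prompt_eq_alt text extra_vars
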